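-- pv_equiv track=rewrite | github.com/PiCindy/Term-Identification | code/iob_tagging.py | iob_tagging
-- ===== SOURCE A (Python) =====
-- def iob_tagging(tokens: list, terms: list):
--     iob = []
--     i, j, k = 0, 1, 2
--     while i < len(tokens):
--         token = tokens[i]
--         found = False
--         if token == '':
--             iob.append('')
--             found = True
--             i+=1
--             j+=1
--             k+=1
--         for term in terms:
--             st = term.strip().split(' ')
--             if len(st) == 1:
--                 if token == st[0]:
--                     iob.append('B')
--                     found = True
--                     i+=1
--                     j+=1
--                     k+=1
--                     break
--             elif j < len(tokens) and len(st) == 2: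
--                 second_token = tokens[j]
--                 if token == st[0] and second_token == st[1]:
--                     iob.append('B')
--                     iob.append('I')
--                     i+=2
--                     j+=2
--                     k+=2
--                     found = True
--                     break
--             elif k < len(tokens) and len(st) == 3:
--                 second_token = tokens[j]
--                 third_token = tokens[k]
--                 if token == st[0] and second_token == st[1] and third_token == st[2]:
--                     iob.append('B')
--                     iob.append('I')
--                     iob.append('I')
--                     i+=3
--                     j+=3
--                     k+=3
--                     found = True
--                     break
--         if not found:
--             iob.append('O')
--             i+=1
--             j+=1
--             k+=1
--     return iob
-- ===== SOURCE B (Python) =====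
-- def iob_tagging(tokens: list, terms: list):
--     # Precompute: split each term once, keep 1-3 word terms, index them by
--     # their first word (original order preserved within each bucket).
--     entries = []
--     for term in terms:
--         parts = term.strip().split(' ')
--         if len(parts) <= 3:
--             entries.append((parts[0], parts))
--     index = {}
--     for key, parts in entries:
--         index.setdefault(key, []).append(parts)
--     n = len(tokens)
--     iob = []
--     i = 0
--     while i < n:
--         token = tokens[i]
--         if token == '':
--             iob.append('')
--             i += 1
--             continue
--         match = None
--         for parts in index.get(token, []):
--             if len(parts) == 1:
--                 match = parts
--                 break
--             if i + len(parts) <= n and tokens[i + 1:i + len(parts)] == parts[1:]: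
--                 match = parts
--                 break
--         if match is None:
--             iob.append('O')
--             i += 1
--         else:
--             rest = match[1:]
--             iob.append('B')
--             iob.extend(['I'] * len(rest))
--             i += 1 + len(rest)
--     return iob
-- ===== Notes on version B (the rewrite author's own statement) =====
-- stated objective: faster
-- what changed: B splits and strips every term once up front and builds a dict indexing the split terms by their first word, so each token position scans only its own small candidate bucket (comparing the tail with one slice) instead of re-stripping, re-splitting and re-testing the whole term list at every position as A does; B also drops A's stale-empty-token rescan (see differs).
-- intended difference: On inputs whose tokens contain an empty string while terms contain a whitespace-only term, A appends '' for the empty token but then keeps matching the stale empty token against the whitespace-only term, appending a spurious extra 'B' and silently skipping the next token (e.g. A(['','x'],[' ']) = ['','B']); B tags the empty token '' and goes on to tag 'x' normally (['','O']), which is the intended behaviour. — e.g. on iob_tagging(["", "x"], [" "]): A returns ["", "B"], B returns ["", "O"]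
import Mathlib
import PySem

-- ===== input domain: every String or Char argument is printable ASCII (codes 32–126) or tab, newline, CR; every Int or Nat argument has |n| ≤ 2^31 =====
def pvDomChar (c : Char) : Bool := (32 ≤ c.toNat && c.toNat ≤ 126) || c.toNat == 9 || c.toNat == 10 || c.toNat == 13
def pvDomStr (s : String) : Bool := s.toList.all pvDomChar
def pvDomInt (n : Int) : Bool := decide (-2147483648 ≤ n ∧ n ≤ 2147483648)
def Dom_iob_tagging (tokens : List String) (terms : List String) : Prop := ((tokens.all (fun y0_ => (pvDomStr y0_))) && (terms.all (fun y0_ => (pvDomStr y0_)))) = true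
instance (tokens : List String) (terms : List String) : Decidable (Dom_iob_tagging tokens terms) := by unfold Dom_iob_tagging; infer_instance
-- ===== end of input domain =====

-- B replaces A's per-position re-split-and-rescan of every raw term by a
-- once-precomputed first-word index of the split terms; B also drops A's
-- accidental extra matching of a stale empty token (see D_ below).

-- shared Python shorthand: s.split(' ')  (split? is total here: the separator " " is nonempty)
def pySplitSpace (s : String) : List String := (PySem.Str.split? s " ").getD []

-- ===== PORT A =====
-- the 'for term in terms' loop: returns the number of 'I' tags of the first matching term (0, 1 or 2)
def findTermA (tokens : List String) (token : String) (i : Nat) : List String → Option Nat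
  | [] => none
  | term :: rest =>
    let st := pySplitSpace (PySem.Str.strip term)
    if st.length = 1 then
      if token = st.getD 0 "" then some 0 else findTermA tokens token i rest
    else if i + 1 < tokens.length ∧ st.length = 2 then
      if token = st.getD 0 "" ∧ tokens.getD (i+1) "" = st.getD 1 "" then some 1
      else findTermA tokens token i rest
    else if i + 2 < tokens.length ∧ st.length = 3 then
      if token = st.getD 0 "" ∧ tokens.getD (i+1) "" = st.getD 1 ""
          ∧ tokens.getD (i+2) "" = st.getD 2 "" then some 2
      else findTermA tokens token i rest
    else findTermA tokens token i rest

-- the while loop (fuel only makes it total: i grows every iteration, so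
-- tokens.length + 1 iterations always suffice); on an empty token A appends ''
-- advances, and then still runs the term loop with the stale token '' at the
-- shifted position
def loopA (tokens terms : List String) : Nat → Nat → List String → List String
  | 0, _, acc => acc
  | fuel+1, i, acc =>
    if i < tokens.length then
      let token := tokens.getD i ""
      if token = "" then
        match findTermA tokens "" (i+1) terms with
        | some nI => loopA tokens terms fuel (i + 2 + nI) (acc ++ [""] ++ ["B"] ++ List.replicate nI "I")
        | none => loopA tokens terms fuel (i+1) (acc ++ [""])
      else
        match findTermA tokens token i terms with
        | some nI => loopA tokens terms fuel (i + 1 + nI) (acc ++ ["B"] ++ List.replicate nI "I")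
        | none => loopA tokens terms fuel (i+1) (acc ++ ["O"])
    else acc

def iob_tagging (tokens : List String) (terms : List String) : List String :=
  loopA tokens terms (tokens.length + 1) 0 []

-- ===== PORT B =====
-- entries: each term split once, 1-3 word terms kept, keyed by first word
def iobEntries (terms : List String) : List (String × List String) :=
  terms.filterMap (fun term =>
    let parts := pySplitSpace (PySem.Str.strip term)
    if parts.length ≤ 3 then some (parts.getD 0 "", parts) else none)

-- index = {}; for key, parts in entries: index.setdefault(key, []).append(parts)
def iobIndex (terms : List String) : PySem.Dict String (List (List String)) :=
  (iobEntries terms).foldl (fun d p => d.modify p.1 [] (· ++ [p.2])) PySem.Dict.empty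

-- the 'for parts in index.get(token, [])' loop: first candidate matching at position i
def scanB (tokens : List String) (i : Nat) : List (List String) → Option (List String)
  | [] => none
  | parts :: rest =>
    if parts.length = 1 then some parts
    else if i + parts.length ≤ tokens.length ∧
        PySem.List.slice tokens (some ((i+1 : Nat) : Int)) (some ((i + parts.length : Nat) : Int))
          = parts.drop 1 then some parts
    else scanB tokens i rest

-- the while loop of B (same fuel-for-totality device as loopA)
def loopB (tokens : List String) (index : PySem.Dict String (List (List String))) :
    Nat → Nat → List String → List String
  | 0, _, acc => acc
  | fuel+1, i, acc =>
    if i < tokens.length then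
      let token := tokens.getD i ""
      if token = "" then loopB tokens index fuel (i+1) (acc ++ [""])
      else
        match scanB tokens i (index.getD token []) with
        | some parts =>
            loopB tokens index fuel (i + 1 + (parts.drop 1).length)
              (acc ++ ["B"] ++ List.replicate (parts.drop 1).length "I")
        | none => loopB tokens index fuel (i+1) (acc ++ ["O"])
    else acc

def iob_tagging_alt (tokens : List String) (terms : List String) : List String :=
  loopB tokens (iobIndex terms) (tokens.length + 1) 0 []

-- ===== PRECONDITION & SPEC =====
-- On inputs whose tokens contain an empty string while terms contain a whitespace-only
-- term, A tags the empty token '' but then keeps matching the stale empty token against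
-- that term, appending a spurious extra 'B' and silently skipping the next token;
-- B tags the empty token '' and moves on, which is the intended behaviour.
def D_iob_tagging (tokens : List String) (terms : List String) : Prop :=
  "" ∈ tokens ∧ ∃ t ∈ terms, (pySplitSpace (PySem.Str.strip t)).getD 0 "" = ""
instance (tokens : List String) (terms : List String) : Decidable (D_iob_tagging tokens terms) := by
  unfold D_iob_tagging; infer_instance

def Spec_iob_tagging (tokens : List String) (terms : List String) (out : List String) : Prop :=
  ¬ D_iob_tagging tokens terms → out = iob_tagging_alt tokens terms
instance (tokens : List String) (terms : List String) (out : List String) : Decidable (Spec_iob_tagging tokens terms out) := by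
  unfold Spec_iob_tagging; infer_instance

def pvDiffWitness_iob_tagging : List String × List String := (["", "x"], [" "])
def pvDiffWitnessOut_iob_tagging : (List String) × (List String) := (["", "B"], ["", "O"])

-- ===== CLAIM (what is proved, stated in full; the proofs are below) =====
def Claim_unchanged_iob_tagging : Prop := ∀ (tokens : List String) (terms : List String), Dom_iob_tagging tokens terms → Spec_iob_tagging tokens terms (iob_tagging tokens terms)
def Claim_changed_iob_tagging : Prop := Dom_iob_tagging (pvDiffWitness_iob_tagging.1) (pvDiffWitness_iob_tagging.2) ∧ D_iob_tagging (pvDiffWitness_iob_tagging.1) (pvDiffWitness_iob_tagging.2) ∧ iob_tagging (pvDiffWitness_iob_tagging.1) (pvDiffWitness_iob_tagging.2) = pvDiffWitnessOut_iob_tagging.1 ∧ iob_tagging_alt (pvDiffWitness_iob_tagging.1) (pvDiffWitness_iob_tagging.2) = pvDiffWitnessOut_iob_tagging.2 ∧ pvDiffWitnessOut_iob_tagging.1 ≠ pvDiffWitnessOut_iob_tagging.2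

-- ===== LEMMAS AND PROOFS =====

-- str.split(' ') never returns the empty list
theorem splitOnGo_ne_nil (sep : List Char) : ∀ (fuel : Nat) (l cur : List Char) (acc : List (List Char)),
    PySem.Chars.splitOn.go sep fuel l cur acc ≠ [] := by
  intro fuel
  induction fuel with
  | zero => intro l cur acc; simp [PySem.Chars.splitOn.go]
  | succ n ih =>
    intro l cur acc
    cases l with
    | nil => simp [PySem.Chars.splitOn.go]
    | cons c rest =>
      rw [PySem.Chars.splitOn.go]
      split
      · exact ih _ _ _
      · exact ih _ _ _

theorem pySplitSpace_ne_nil (s : String) : pySplitSpace s ≠ [] := by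
  unfold pySplitSpace
  unfold PySem.Str.split?
  rw [show PySem.Chars.split? s.toList " ".toList
        = some (PySem.Chars.splitOn s.toList " ".toList) from by
      simp [PySem.Chars.split?]]
  simp [PySem.Chars.splitOn]
  exact splitOnGo_ne_nil _ _ _ _ _

-- the candidate bucket B scans for a given token
def candsOf (terms : List String) (token : String) : List (List String) :=
  ((iobEntries terms).filter (fun p => p.1 == token)).map (·.2)

theorem getD_iobIndex (terms : List String) (token : String) :
    (iobIndex terms).getD token [] = candsOf terms token := by
  unfold iobIndex candsOf
  rw [PySem.Dict.getD_foldl_modify_append]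
  simp

theorem candsOf_nil (token : String) : candsOf [] token = [] := by
  simp [candsOf, iobEntries]

theorem candsOf_cons (t : String) (rest : List String) (token : String) :
    candsOf (t :: rest) token =
      (if (pySplitSpace (PySem.Str.strip t)).length ≤ 3
          ∧ (pySplitSpace (PySem.Str.strip t)).getD 0 "" = token
        then pySplitSpace (PySem.Str.strip t) :: candsOf rest token
        else candsOf rest token) := by
  simp only [candsOf, iobEntries, List.filterMap_cons]
  set st := pySplitSpace (PySem.Str.strip t) with hst
  clear_value st
  by_cases h3 : st.length ≤ 3
  · by_cases hk : st.getD 0 "" = token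
    all_goals simp only [List.getD] at hk
    · simp [h3, hk]
    · simp [h3, hk]
  · simp [h3]

-- A's term scan equals B's scan of the token's candidate bucket
theorem scan_eq (tokens : List String) (token : String) (i : Nat) :
    ∀ terms, findTermA tokens token i terms
      = (scanB tokens i (candsOf terms token)).map (fun parts => parts.length - 1) := by
  intro terms
  induction terms with
  | nil => simp [findTermA, candsOf_nil, scanB]
  | cons t rest ih =>
    rw [candsOf_cons]
    simp only [findTermA]
    have hne := pySplitSpace_ne_nil (PySem.Str.strip t)
    set st := pySplitSpace (PySem.Str.strip t) with hst
    clear_value st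
    have hL : 1 ≤ st.length := by
      cases st with
      | nil => exact absurd rfl hne
      | cons a l => simp
    by_cases hkey : st.getD 0 "" = token
    case neg =>
      have hkey' : ¬ token = st.getD 0 "" := fun h => hkey h.symm
      have hcond : ¬ (st.length ≤ 3 ∧ st.getD 0 "" = token) := fun h => hkey h.2
      rw [if_neg hcond]
      by_cases h1 : st.length = 1
      · rw [if_pos h1, if_neg hkey', ih]
      · rw [if_neg h1]
        by_cases h2 : i + 1 < tokens.length ∧ st.length = 2
        · have hm : ¬ (token = st.getD 0 "" ∧ tokens.getD (i+1) "" = st.getD 1 "") :=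
            fun h => hkey' h.1
          rw [if_pos h2, if_neg hm, ih]
        · rw [if_neg h2]
          by_cases h3 : i + 2 < tokens.length ∧ st.length = 3
          · have hm : ¬ (token = st.getD 0 "" ∧ tokens.getD (i+1) "" = st.getD 1 ""
                ∧ tokens.getD (i+2) "" = st.getD 2 "") := fun h => hkey' h.1
            rw [if_pos h3, if_neg hm, ih]
          · rw [if_neg h3, ih]
    case pos =>
      by_cases h3 : st.length ≤ 3
      case neg =>
        have hcond : ¬ (st.length ≤ 3 ∧ st.getD 0 "" = token) := fun h => h3 h.1
        have e1 : ¬ st.length = 1 := by omega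
        have e2 : ¬ (i + 1 < tokens.length ∧ st.length = 2) := fun h => by omega
        have e3 : ¬ (i + 2 < tokens.length ∧ st.length = 3) := fun h => by omega
        rw [if_neg hcond, if_neg e1, if_neg e2, if_neg e3, ih]
      case pos =>
        have hc : st.length ≤ 3 ∧ st.getD 0 "" = token := ⟨h3, hkey⟩
        rw [if_pos hc]
        have hcase : st.length = 1 ∨ st.length = 2 ∨ st.length = 3 := by omega
        rcases hcase with hl | hl | hl
        · -- one-word term: always matches
          obtain ⟨a, ha⟩ := List.length_eq_one_iff.mp hl
          subst ha
          have ha' : a = token := by simpa using hkey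
          subst ha'
          simp [scanB]
        · -- two-word term
          obtain ⟨a, b, hab⟩ := List.length_eq_two.mp hl
          subst hab
          have ha' : a = token := by simpa using hkey
          subst ha'
          simp only [scanB]
          by_cases hb : i + 1 < tokens.length
          · have hslice : PySem.List.slice tokens (some ((i+1 : Nat) : Int)) (some ((i + 2 : Nat) : Int))
                = [tokens[i+1]] := by
              rw [PySem.List.slice_natCast]
              have h1 : i + 2 - (i + 1) = 1 := by omega
              rw [h1, List.drop_eq_getElem_cons hb]
              rfl
            push_cast at hslice
            have hguard : i + 2 ≤ tokens.length := by omega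
            have hgetD : tokens.getD (i+1) "" = tokens[i+1] := List.getD_eq_getElem _ _ hb
            by_cases hmatch : tokens[i+1] = b
            · simp [hb, hslice, hguard]
              split_ifs with h <;> first | rfl | simp_all
            · simp [hb, hslice, hguard, ih]
              split_ifs with h <;> simp_all
          · have hguard : ¬ (i + 2 ≤ tokens.length) := by omega
            simp [hb, hguard, ih]
        · -- three-word term
          obtain ⟨a, b, c, habc⟩ := List.length_eq_three.mp hl
          subst habc
          have ha' : a = token := by simpa using hkey
          subst ha'
          simp only [scanB]
          by_cases hb : i + 2 < tokens.length
          · have hb1 : i + 1 < tokens.length := by omega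
            have hslice : PySem.List.slice tokens (some ((i+1 : Nat) : Int)) (some ((i + 3 : Nat) : Int))
                = [tokens[i+1], tokens[i+2]] := by
              rw [PySem.List.slice_natCast]
              have h1 : i + 3 - (i + 1) = 2 := by omega
              have hdrop : tokens.drop (i+2) = tokens[i+2] :: tokens.drop (i+3) := by
                rw [List.drop_eq_getElem_cons hb]
              rw [h1, List.drop_eq_getElem_cons hb1, List.take_succ_cons, hdrop, List.take_succ_cons]
              rfl
            push_cast at hslice
            have hguard : i + 3 ≤ tokens.length := by omega
            have hg1 : tokens.getD (i+1) "" = tokens[i+1] := List.getD_eq_getElem _ _ hb1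
            have hg2 : tokens.getD (i+2) "" = tokens[i+2] := List.getD_eq_getElem _ _ hb
            by_cases hm1 : tokens[i+1] = b
            · by_cases hm2 : tokens[i+2] = c
              · simp [hb, hslice, hguard, hm1]
                split_ifs with h <;> first | rfl | simp_all
              · simp [hb, hslice, hguard, hm1, ih]
                split_ifs with h <;> first | rfl | simp_all
            · simp [hb, hslice, hguard, hm1, ih]
              intro hx _
              rw [List.getElem?_eq_getElem hb1] at hx
              simp at hx
              exact absurd hx hm1
          · have hguard : ¬ (i + 3 ≤ tokens.length) := by omega
            simp [hb, hguard, ih]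

-- without a whitespace-only term the empty token's bucket is empty
theorem candsOf_empty_of_no_ws (terms : List String)
    (h : ∀ t ∈ terms, (pySplitSpace (PySem.Str.strip t)).getD 0 "" ≠ "") :
    candsOf terms "" = [] := by
  induction terms with
  | nil => exact candsOf_nil _
  | cons t rest ih =>
    rw [candsOf_cons]
    rw [if_neg]
    · exact ih (fun t' ht' => h t' (by simp [ht']))
    · rintro ⟨_, h0⟩
      exact h t (by simp) h0

theorem loop_eq (tokens terms : List String)
    (hD : ¬ D_iob_tagging tokens terms) :
    ∀ (fuel i : Nat) (acc : List String),
      loopA tokens terms fuel i acc = loopB tokens (iobIndex terms) fuel i acc := by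
  intro fuel
  induction fuel with
  | zero => intro i acc; rfl
  | succ m ih =>
    intro i acc
    rw [loopA, loopB]
    by_cases hi : i < tokens.length
    case neg => simp [hi]
    case pos =>
      simp only [hi, if_pos]
      by_cases htok : tokens.getD i "" = ""
      · -- empty token: A's stale rescan finds nothing outside D_
        have hmem : "" ∈ tokens := by
          rw [← htok, List.getD_eq_getElem _ _ hi]
          exact List.getElem_mem hi
        have hnows : ∀ t ∈ terms, (pySplitSpace (PySem.Str.strip t)).getD 0 "" ≠ "" := by
          intro t ht
          by_contra hc
          exact hD ⟨hmem, t, ht, hc⟩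

        have hnone : findTermA tokens "" (i+1) terms = none := by
          rw [scan_eq, candsOf_empty_of_no_ws terms hnows]
          simp [scanB]
        simp only [htok, if_pos, hnone]
        exact ih (i+1) (acc ++ [""])
      · simp only [htok, if_false]
        rw [getD_iobIndex, scan_eq]
        cases hscan : scanB tokens i (candsOf terms (tokens.getD i "")) with
        | none => simp only [Option.map_none]; exact ih (i+1) (acc ++ ["O"])
        | some parts =>
          simp only [Option.map_some, List.length_drop]
          exact ih (i + 1 + (parts.length - 1)) _

-- ===== VERDICT (by name: the statement is the Claim_ definition above) =====
theorem iob_tagging_spec : Claim_unchanged_iob_tagging := by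
  intro tokens terms _ hD
  unfold iob_tagging iob_tagging_alt
  exact loop_eq tokens terms hD (tokens.length + 1) 0 []

theorem iob_tagging_changed : Claim_changed_iob_tagging := by
  unfold Claim_changed_iob_tagging; decide
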